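-- pv_equiv track=rewrite | github.com/aditauqir/AWRY | src/dashboard/components/model_explainer.py | _feature_family_counts
-- ===== SOURCE A (Python) =====
-- def _feature_family_counts(x_cols: list[str]) -> dict[str, int]:
--     lag = [c for c in x_cols if c.endswith(("_lag1", "_lag2"))]
--     trend = [c for c in x_cols if c.endswith("_trend12") or c.endswith("_ma3")]
--     change = [c for c in x_cols if c.endswith("_chg12")]
--     structure = [c for c in x_cols if c in {"SAHM_GAP", "T10Y3M_INVERSION_DURATION"} or c.endswith("_available")]
--     used = set(lag + trend + change + structure)
--     base = [c for c in x_cols if c not in used]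
--     return {
--         "Base monthly inputs": len(base),
--         "Lag features": len(lag),
--         "Trend features": len(trend),
--         "12-month change features": len(change),
--         "Structural regime features": len(structure),
--     }
-- ===== SOURCE B (Python) =====
-- def _feature_family_counts(x_cols: list[str]) -> dict[str, int]:
--     base = lag = trend = change = structure = 0
--     for c in x_cols:
--         if c.endswith("_lag1") or c.endswith("_lag2"):
--             lag += 1
--         elif c.endswith("_trend12") or c.endswith("_ma3"):
--             trend += 1
--         elif c.endswith("_chg12"):
--             change += 1
--         elif c in ("SAHM_GAP", "T10Y3M_INVERSION_DURATION") or c.endswith("_available"):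
--             structure += 1
--         else:
--             base += 1
--     return {
--         "Base monthly inputs": base,
--         "Lag features": lag,
--         "Trend features": trend,
--         "12-month change features": change,
--         "Structural regime features": structure,
--     }
-- ===== Notes on version B (the rewrite author's own statement) =====
-- stated objective: simpler
-- what changed: A makes five filter passes over x_cols plus a set construction and a sixth membership-filter pass for the residual; B makes a single pass with a mutually exclusive if/elif chain incrementing five counters (the families' suffixes are pairwise incompatible, so per-column priority classification yields the same counts).
import Mathlib
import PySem

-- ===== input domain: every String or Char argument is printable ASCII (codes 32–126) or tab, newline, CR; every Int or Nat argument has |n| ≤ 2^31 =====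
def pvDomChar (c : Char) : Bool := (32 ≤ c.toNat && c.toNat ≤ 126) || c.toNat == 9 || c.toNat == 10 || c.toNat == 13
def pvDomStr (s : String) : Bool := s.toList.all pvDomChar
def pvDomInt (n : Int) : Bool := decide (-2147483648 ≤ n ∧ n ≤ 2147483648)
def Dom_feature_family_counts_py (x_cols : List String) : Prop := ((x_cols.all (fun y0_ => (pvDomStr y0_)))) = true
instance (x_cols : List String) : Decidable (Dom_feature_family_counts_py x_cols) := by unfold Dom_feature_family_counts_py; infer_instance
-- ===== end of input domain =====

-- B replaces A's five filter passes plus a set-difference pass by ONE pass with a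
-- mutually exclusive if/elif chain incrementing five counters (objective: simpler).

-- the four family conditions, shared by both ports (the comprehension tests of A = the elif tests of B)
def pL (c : String) : Bool := PySem.Str.endswith c "_lag1" || PySem.Str.endswith c "_lag2"
def pT (c : String) : Bool := PySem.Str.endswith c "_trend12" || PySem.Str.endswith c "_ma3"
def pC (c : String) : Bool := PySem.Str.endswith c "_chg12"
def pS (c : String) : Bool := (c == "SAHM_GAP" || c == "T10Y3M_INVERSION_DURATION") || PySem.Str.endswith c "_available"

-- ===== PORT A =====
def feature_family_counts_py (x_cols : List String) : List (String × Int) :=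
  let lag := x_cols.filter pL
  let trend := x_cols.filter pT
  let change := x_cols.filter pC
  let structure_ := x_cols.filter pS
  let used : PySem.Set String := PySem.Set.ofList (lag ++ trend ++ change ++ structure_)
  let base := x_cols.filter (fun c => !(PySem.Set.contains used c))
  [("Base monthly inputs", (base.length : Int)),
   ("Lag features", (lag.length : Int)),
   ("Trend features", (trend.length : Int)),
   ("12-month change features", (change.length : Int)),
   ("Structural regime features", (structure_.length : Int))]

-- ===== PORT B =====
-- one step of B's loop: the if/elif chain over the five counters (base, lag, trend, change, structure)
def featFamStep (acc : Int × Int × Int × Int × Int) (c : String) : Int × Int × Int × Int × Int :=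
  let (b, l, t, ch, st) := acc
  if pL c then (b, l + 1, t, ch, st)
  else if pT c then (b, l, t + 1, ch, st)
  else if pC c then (b, l, t, ch + 1, st)
  else if pS c then (b, l, t, ch, st + 1)
  else (b + 1, l, t, ch, st)

def feature_family_counts_py_alt (x_cols : List String) : List (String × Int) :=
  let (b, l, t, ch, st) := x_cols.foldl featFamStep (0, 0, 0, 0, 0)
  [("Base monthly inputs", b),
   ("Lag features", l),
   ("Trend features", t),
   ("12-month change features", ch),
   ("Structural regime features", st)]

-- ===== PRECONDITION & SPEC =====
def Spec_feature_family_counts_py (x_cols : List String) (out : List (String × Int)) : Prop := out = feature_family_counts_py_alt x_cols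
instance (x_cols : List String) (out : List (String × Int)) : Decidable (Spec_feature_family_counts_py x_cols out) := by unfold Spec_feature_family_counts_py; infer_instance

-- ===== CLAIM (what is proved, stated in full; the proofs are below) =====
def Claim_equal_feature_family_counts_py : Prop := ∀ (x_cols : List String), Dom_feature_family_counts_py x_cols → Spec_feature_family_counts_py x_cols (feature_family_counts_py x_cols)

-- ===== LEMMAS AND PROOFS =====
-- the residual ("base") predicate, i.e. B's final else branch
def pB (c : String) : Bool := !pL c && !pT c && !pC c && !pS c

-- the common canonical value of both programs
def famCanon (xs : List String) : List (String × Int) :=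
  [("Base monthly inputs", (xs.countP pB : Int)),
   ("Lag features", (xs.countP pL : Int)),
   ("Trend features", (xs.countP pT : Int)),
   ("12-month change features", (xs.countP pC : Int)),
   ("Structural regime features", (xs.countP pS : Int))]

-- no string ends with two incomparable suffixes
theorem no_both (l u v : List Char) (h1 : ¬ u <:+ v) (h2 : ¬ v <:+ u) :
    ¬ (PySem.Chars.endswith l u = true ∧ PySem.Chars.endswith l v = true) := by
  rintro ⟨hu, hv⟩
  rw [PySem.Chars.endswith_iff] at hu hv
  rcases le_total u.length v.length with h | h
  · exact h1 (List.suffix_of_suffix_length_le hu hv h)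
  · exact h2 (List.suffix_of_suffix_length_le hv hu h)

theorem pT_of_pL (c : String) (h : pL c = true) : pT c = false := by
  unfold pL at h; unfold pT
  rcases Bool.or_eq_true_iff.mp h with h | h <;>
    cases ht1 : PySem.Str.endswith c "_trend12" <;> cases ht2 : PySem.Str.endswith c "_ma3" <;>
    simp_all <;>
    first
    | exact no_both _ _ _ (by decide) (by decide) ⟨h, ht1⟩
    | exact no_both _ _ _ (by decide) (by decide) ⟨h, ht2⟩

theorem pC_of_pL (c : String) (h : pL c = true) : pC c = false := by
  unfold pL at h; unfold pC
  rcases Bool.or_eq_true_iff.mp h with h | h <;> cases hc : PySem.Str.endswith c "_chg12" <;>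
    simp_all <;> exact no_both _ _ _ (by decide) (by decide) ⟨h, hc⟩

theorem pC_of_pT (c : String) (h : pT c = true) : pC c = false := by
  unfold pT at h; unfold pC
  rcases Bool.or_eq_true_iff.mp h with h | h <;> cases hc : PySem.Str.endswith c "_chg12" <;>
    simp_all <;> exact no_both _ _ _ (by decide) (by decide) ⟨h, hc⟩

theorem pS_val (c : String) (h : pS c = true) :
    pL c = false ∧ pT c = false ∧ pC c = false := by
  unfold pS at h
  rcases Bool.or_eq_true_iff.mp h with h | h
  · rcases Bool.or_eq_true_iff.mp h with h | h <;>
      · have : c = _ := eq_of_beq h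
        subst this; exact ⟨by decide, by decide, by decide⟩
  · refine ⟨?_, ?_, ?_⟩
    · unfold pL
      cases h1 : PySem.Str.endswith c "_lag1" <;> cases h2 : PySem.Str.endswith c "_lag2" <;>
        simp_all <;>
        first
        | exact no_both _ _ _ (by decide) (by decide) ⟨h, h1⟩
        | exact no_both _ _ _ (by decide) (by decide) ⟨h, h2⟩
    · unfold pT
      cases h1 : PySem.Str.endswith c "_trend12" <;> cases h2 : PySem.Str.endswith c "_ma3" <;>
        simp_all <;>
        first
        | exact no_both _ _ _ (by decide) (by decide) ⟨h, h1⟩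
        | exact no_both _ _ _ (by decide) (by decide) ⟨h, h2⟩
    · unfold pC
      cases h1 : PySem.Str.endswith c "_chg12" <;> simp_all
      exact no_both _ _ _ (by decide) (by decide) ⟨h, h1⟩

-- the elif guards coincide with the plain predicates, by mutual exclusivity of the families
theorem guard_T (c : String) : (!pL c && pT c) = pT c := by
  cases h : pT c
  · simp
  · cases hl : pL c
    · simp
    · rw [pT_of_pL c hl] at h; exact absurd h (by simp)

theorem guard_C (c : String) : (!pL c && (!pT c && pC c)) = pC c := by
  cases h : pC c
  · simp
  · cases hl : pL c
    · cases ht : pT c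
      · simp
      · rw [pC_of_pT c ht] at h; exact absurd h (by simp)
    · rw [pC_of_pL c hl] at h; exact absurd h (by simp)

theorem guard_S (c : String) : (!pL c && (!pT c && (!pC c && pS c))) = pS c := by
  cases h : pS c
  · simp
  · obtain ⟨h1, h2, h3⟩ := pS_val c h
    simp [h1, h2, h3]

-- one step of B, written with the residual guards the elif chain realises
theorem step_eq (b l t ch st : Int) (c : String) :
    featFamStep (b, l, t, ch, st) c =
      (b + (if pB c then 1 else 0),
       l + (if pL c then 1 else 0),
       t + (if !pL c && pT c then 1 else 0),
       ch + (if !pL c && (!pT c && pC c) then 1 else 0),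
       st + (if !pL c && (!pT c && (!pC c && pS c)) then 1 else 0)) := by
  unfold featFamStep pB
  cases pL c <;> cases pT c <;> cases pC c <;> cases pS c <;> simp

-- B's fold computes the five counts (with the elif guards)
theorem fold_invariant (xs : List String) (b l t ch st : Int) :
    xs.foldl featFamStep (b, l, t, ch, st) =
      (b + (xs.countP pB : Int),
       l + (xs.countP pL : Int),
       t + (xs.countP (fun c => !pL c && pT c) : Int),
       ch + (xs.countP (fun c => !pL c && (!pT c && pC c)) : Int),
       st + (xs.countP (fun c => !pL c && (!pT c && (!pC c && pS c))) : Int)) := by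
  induction xs generalizing b l t ch st with
  | nil => simp
  | cons c xs ih =>
    rw [List.foldl_cons, step_eq, ih]
    simp only [List.countP_cons, Prod.mk.injEq]
    refine ⟨?_, ?_, ?_, ?_, ?_⟩ <;> push_cast <;> split_ifs <;> ring

-- A's "used"-membership, for columns of the list, is the disjunction of the four predicates
theorem contains_eq (xs : List String) (c : String) (hc : c ∈ xs) :
    PySem.Set.contains (PySem.Set.ofList
      ((xs.filter pL) ++ (xs.filter pT) ++ (xs.filter pC) ++ (xs.filter pS))) c
      = (pL c || pT c || pC c || pS c) := by
  by_cases h : (pL c || pT c || pC c || pS c) = true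
  · rw [h]
    refine (PySem.Set.contains_iff _ _).2 ?_
    rw [PySem.Set.mem_ofList]
    simp only [List.mem_append, List.mem_filter]
    rcases Bool.or_eq_true_iff.mp h with h' | h'
    · rcases Bool.or_eq_true_iff.mp h' with h'' | h''
      · rcases Bool.or_eq_true_iff.mp h'' with h3 | h3
        · exact Or.inl (Or.inl (Or.inl ⟨hc, h3⟩))
        · exact Or.inl (Or.inl (Or.inr ⟨hc, h3⟩))
      · exact Or.inl (Or.inr ⟨hc, h''⟩)
    · exact Or.inr ⟨hc, h'⟩
  · rw [Bool.eq_false_iff.2 h]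
    have hnot : ¬ (PySem.Set.contains (PySem.Set.ofList
        ((xs.filter pL) ++ (xs.filter pT) ++ (xs.filter pC) ++ (xs.filter pS))) c = true) := by
      intro hct
      have hm := (PySem.Set.contains_iff _ _).1 hct
      rw [PySem.Set.mem_ofList] at hm
      simp only [List.mem_append, List.mem_filter] at hm
      rcases hm with ((⟨_, h3⟩ | ⟨_, h3⟩) | ⟨_, h3⟩) | ⟨_, h3⟩ <;> simp_all
    exact Bool.eq_false_iff.2 hnot

-- A's base pass counts exactly the residual predicate
theorem base_len (xs : List String) :
    (xs.filter (fun c => !(PySem.Set.contains (PySem.Set.ofList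
      ((xs.filter pL) ++ (xs.filter pT) ++ (xs.filter pC) ++ (xs.filter pS))) c))).length
      = xs.countP pB := by
  rw [← List.countP_eq_length_filter]
  apply List.countP_congr
  intro c hc
  rw [contains_eq xs c hc]
  unfold pB
  cases pL c <;> cases pT c <;> cases pC c <;> cases pS c <;> rfl

theorem A_eq (xs : List String) : feature_family_counts_py xs = famCanon xs := by
  unfold feature_family_counts_py famCanon
  dsimp only
  rw [base_len xs]
  simp only [List.countP_eq_length_filter]

theorem B_eq (xs : List String) : feature_family_counts_py_alt xs = famCanon xs := by
  unfold feature_family_counts_py_alt famCanon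
  dsimp only
  rw [fold_invariant,
      show (fun c => !pL c && pT c) = pT from funext guard_T,
      show (fun c => !pL c && (!pT c && pC c)) = pC from funext guard_C,
      show (fun c => !pL c && (!pT c && (!pC c && pS c))) = pS from funext guard_S]
  simp only [zero_add]

-- ===== VERDICT (by name: the statement is the Claim_ definition above) =====
theorem feature_family_counts_py_spec : Claim_equal_feature_family_counts_py := by
  intro xs _
  unfold Spec_feature_family_counts_py
  rw [A_eq, B_eq]
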